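-- pv_equiv track=rewrite | github.com/mggg/metagraph-investigations | jamie.py | is_head
-- ===== SOURCE A (Python) =====
-- def dfs(start_cell, board, reachable, district):
--     start_row, start_column = start_cell
--     if start_cell in reachable or board[start_row][start_column] != district:
--         return
--     reachable.add(start_cell)
--     for diff_row, diff_column in [[0, 1], [-1, 0], [0, -1], [1, 0]]:
--         row = start_row + diff_row
--         column = start_column + diff_column
--         new_cell = (row, column)
--         if not (row < 0 or column < 0 or row >= len(board) or column >= len(board[0])):
--             dfs(new_cell, board, reachable, district)
--
-- def is_head(board, bite_row, bite_column):
--     district = board[bite_row][bite_column]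
--     reachable = {(bite_row, bite_column)}
--     found_body = False
--     for diff_row, diff_column in [[0, 1], [-1, 0], [0, -1], [1, 0]]:
--         row = bite_row + diff_row
--         column = bite_column + diff_column
--         if (not (row < 0 or column < 0 or row >= len(board) or column >= len(board[0]))) and board[row][column] == district:
--             start_cell = (row, column)
--             if found_body and not (start_cell in reachable):
--                     return False
--             else:
--                 found_body = True
--                 dfs(start_cell, board, reachable, district)
--     return True
-- ===== SOURCE B (Python) =====
-- def is_head(board, bite_row, bite_column):
--     district = board[bite_row][bite_column]
--     height, width = len(board), len(board[0])
--     reachable = {(bite_row, bite_column)}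
--     found_body = False
--     for diff_row, diff_column in ((0, 1), (-1, 0), (0, -1), (1, 0)):
--         row, column = bite_row + diff_row, bite_column + diff_column
--         if 0 <= row < height and 0 <= column < width and board[row][column] == district:
--             if found_body and (row, column) not in reachable:
--                 return False
--             found_body = True
--             stack = [(row, column)]
--             while stack:
--                 r, c = stack.pop()
--                 if (r, c) in reachable or board[r][c] != district:
--                     continue
--                 reachable.add((r, c))
--                 # push in reverse so pop() explores neighbours in the same order
--                 for dr, dc in ((1, 0), (0, -1), (-1, 0), (0, 1)):
--                     nr, nc = r + dr, c + dc
--                     if 0 <= nr < height and 0 <= nc < width: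
--                         stack.append((nr, nc))
--     return True
-- ===== Notes on version B (the rewrite author's own statement) =====
-- stated objective: alternative
-- what changed: The recursive dfs is replaced by an iterative flood fill over an explicit stack (pop a cell, skip if visited or wrong district, mark it, push its in-bounds neighbours), removing recursion entirely; the four-neighbour driver with its found_body short-circuit is kept.
-- outside the precondition, e.g. on is_head([[1, 2], [3]], 0, 0): A returns True, B returns True
import Mathlib
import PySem

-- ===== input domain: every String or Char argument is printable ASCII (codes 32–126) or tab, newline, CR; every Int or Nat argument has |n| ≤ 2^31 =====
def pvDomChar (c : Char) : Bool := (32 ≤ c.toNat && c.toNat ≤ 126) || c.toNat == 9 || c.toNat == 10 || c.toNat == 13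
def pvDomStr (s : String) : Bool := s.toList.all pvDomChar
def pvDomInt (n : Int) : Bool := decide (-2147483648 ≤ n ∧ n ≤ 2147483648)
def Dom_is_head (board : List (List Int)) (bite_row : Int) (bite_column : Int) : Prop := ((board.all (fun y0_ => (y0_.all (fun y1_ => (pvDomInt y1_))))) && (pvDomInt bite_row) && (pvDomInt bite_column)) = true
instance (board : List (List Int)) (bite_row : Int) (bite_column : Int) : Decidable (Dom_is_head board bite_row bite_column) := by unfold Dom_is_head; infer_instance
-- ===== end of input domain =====

-- B replaces A's recursive dfs by an iterative flood fill over an explicit stack; the driver and the return value are the same.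

-- helpers shared by both ports (the pvM lemmas below are cited by pvFlood's decreasing_by)
def pvDiffs : List (Int × Int) := [(0, 1), (-1, 0), (0, -1), (1, 0)]

-- board[r][c] for the cells both programs actually read (their callers bound-check r and c first)
def pvCellVal (board : List (List Int)) (r c : Int) : Option Int :=
  if 0 ≤ r ∧ r < (board.length : Int) ∧ 0 ≤ c ∧ c < ((board.headI).length : Int) then
    (board[r.toNat]?).bind fun row => row[c.toNat]?
  else none

def pvBox (board : List (List Int)) : List (Int × Int) :=
  (List.range board.length).flatMap fun r =>
    (List.range (board.headI).length).map fun c => ((r : Int), (c : Int))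

def pvM (board : List (List Int)) (R : List (Int × Int)) : Nat :=
  ((pvBox board).toFinset \ R.toFinset).card

lemma pvMem_box (board : List (List Int)) (r c : Int) :
    (r, c) ∈ pvBox board ↔
      0 ≤ r ∧ r < (board.length : Int) ∧ 0 ≤ c ∧ c < ((board.headI).length : Int) := by
  simp [pvBox, List.mem_flatMap, List.mem_map]
  constructor
  · rintro ⟨⟨a, ha, h1⟩, b, hb, h2⟩
    omega
  · rintro ⟨h1, h2, h3, h4⟩
    exact ⟨⟨r.toNat, by omega, by omega⟩, ⟨c.toNat, by omega, by omega⟩⟩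

lemma pvCellVal_some_box {board : List (List Int)} {r c : Int} {v : Int}
    (h : pvCellVal board r c = some v) : (r, c) ∈ pvBox board := by
  unfold pvCellVal at h
  split at h
  · exact (pvMem_box board r c).2 (by assumption)
  · exact absurd h (by simp)

lemma pvM_lt {board : List (List Int)} {c : Int × Int} {R : List (Int × Int)}
    (hc : c ∈ pvBox board) (hR : c ∉ R) : pvM board (c :: R) < pvM board R := by
  apply Finset.card_lt_card
  constructor
  · refine Finset.sdiff_subset_sdiff (Finset.Subset.refl _) ?_
    intro x hx
    simp only [List.toFinset_cons, Finset.mem_insert] at *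
    exact Or.inr hx
  · intro hsub
    have hmem : c ∈ (pvBox board).toFinset \ R.toFinset := by
      simp [List.mem_toFinset, hc, hR]
    have := hsub hmem
    simp [List.mem_toFinset] at this

-- ===== PORT A =====
-- recursive dfs; fuel is a totality guard only (the driver always supplies enough),
-- and the locals row/column are written inline
def pvDfs (board : List (List Int)) (district : Int) (fuel : Nat)
    (start_cell : Int × Int) (reachable : List (Int × Int)) : List (Int × Int) :=
  if start_cell ∈ reachable ∨ pvCellVal board start_cell.1 start_cell.2 ≠ some district then
    reachable
  else
    match fuel with
    | 0 => reachable
    | n + 1 =>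
      pvDiffs.foldl (fun acc d =>
        if ¬(start_cell.1 + d.1 < 0 ∨ start_cell.2 + d.2 < 0 ∨
              (board.length : Int) ≤ start_cell.1 + d.1 ∨
              ((board.headI).length : Int) ≤ start_cell.2 + d.2)
        then pvDfs board district n (start_cell.1 + d.1, start_cell.2 + d.2) acc
        else acc) (start_cell :: reachable)
termination_by fuel

def pvDriverA (board : List (List Int)) (district : Int) (bite_row bite_column : Int) :
    List (Int × Int) → Bool → List (Int × Int) → Bool
  | [], _, _ => true
  | d :: ds, found_body, reachable =>
    if (¬(bite_row + d.1 < 0 ∨ bite_column + d.2 < 0 ∨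
          (board.length : Int) ≤ bite_row + d.1 ∨
          ((board.headI).length : Int) ≤ bite_column + d.2)) ∧
        pvCellVal board (bite_row + d.1) (bite_column + d.2) = some district then
      if found_body ∧ ¬((bite_row + d.1, bite_column + d.2) ∈ reachable) then false
      else pvDriverA board district bite_row bite_column ds true
        (pvDfs board district ((pvBox board).length + 1) (bite_row + d.1, bite_column + d.2) reachable)
    else pvDriverA board district bite_row bite_column ds found_body reachable

def is_head (board : List (List Int)) (bite_row : Int) (bite_column : Int) : Bool :=
  match PySem.List.pyGet? board bite_row with
  | none => false  -- Python raises IndexError here (outside Pre_)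
  | some row =>
    match PySem.List.pyGet? row bite_column with
    | none => false  -- Python raises IndexError here (outside Pre_)
    | some district =>
      pvDriverA board district bite_row bite_column pvDiffs false [(bite_row, bite_column)]

-- ===== PORT B =====
-- neighbours are pushed in reverse in Source B, so with the stack top at the list head the
-- pushed block reads in pvDiffs order
def pvPush (board : List (List Int)) (c : Int × Int) : List (Int × Int) :=
  pvDiffs.filterMap fun d =>
    if 0 ≤ c.1 + d.1 ∧ c.1 + d.1 < (board.length : Int) ∧
        0 ≤ c.2 + d.2 ∧ c.2 + d.2 < ((board.headI).length : Int) then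
      some (c.1 + d.1, c.2 + d.2)
    else none

def pvFlood (board : List (List Int)) (district : Int)
    (stack reachable : List (Int × Int)) : List (Int × Int) :=
  match stack with
  | [] => reachable
  | c :: st =>
    if h : c ∈ reachable ∨ pvCellVal board c.1 c.2 ≠ some district then
      pvFlood board district st reachable
    else
      pvFlood board district (pvPush board c ++ st) (c :: reachable)
termination_by (pvM board reachable, stack.length)
decreasing_by
  · exact Prod.Lex.right _ (by simp)
  · have h' := not_or.mp h
    exact Prod.Lex.left _ _ (pvM_lt (pvCellVal_some_box (not_not.mp h'.2)) h'.1)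

def pvDriverB (board : List (List Int)) (district : Int) (bite_row bite_column : Int) :
    List (Int × Int) → Bool → List (Int × Int) → Bool
  | [], _, _ => true
  | d :: ds, found_body, reachable =>
    if (0 ≤ bite_row + d.1 ∧ bite_row + d.1 < (board.length : Int) ∧
        0 ≤ bite_column + d.2 ∧ bite_column + d.2 < ((board.headI).length : Int)) ∧
        pvCellVal board (bite_row + d.1) (bite_column + d.2) = some district then
      if found_body ∧ ¬((bite_row + d.1, bite_column + d.2) ∈ reachable) then false
      else pvDriverB board district bite_row bite_column ds true
        (pvFlood board district [(bite_row + d.1, bite_column + d.2)] reachable)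
    else pvDriverB board district bite_row bite_column ds found_body reachable

def is_head_alt (board : List (List Int)) (bite_row : Int) (bite_column : Int) : Bool :=
  match PySem.List.pyGet? board bite_row with
  | none => false
  | some row =>
    match PySem.List.pyGet? row bite_column with
    | none => false
    | some district =>
      pvDriverB board district bite_row bite_column pvDiffs false [(bite_row, bite_column)]

-- ===== PRECONDITION & SPEC =====
-- Pre_ excludes bite indices out of range (A raises IndexError) and boards with a row shorter than
-- row 0, on which A's column bound check (made against row 0 only) can let board[row][column] raise IndexError.
def Pre_is_head (board : List (List Int)) (bite_row : Int) (bite_column : Int) : Prop :=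
  (∀ r ∈ board, (board.headI).length ≤ r.length) ∧
  PySem.Raise.InRange board.length bite_row ∧
  PySem.Raise.InRange (PySem.List.pyGetD board bite_row []).length bite_column
instance (board : List (List Int)) (bite_row : Int) (bite_column : Int) : Decidable (Pre_is_head board bite_row bite_column) := by unfold Pre_is_head; infer_instance

def pvWitness_is_head : List (List Int) × Int × Int := ([[1, 1], [1, 0]], 0, 0)

def Spec_is_head (board : List (List Int)) (bite_row : Int) (bite_column : Int) (out : Bool) : Prop := out = is_head_alt board bite_row bite_column
instance (board : List (List Int)) (bite_row : Int) (bite_column : Int) (out : Bool) : Decidable (Spec_is_head board bite_row bite_column out) := by unfold Spec_is_head; infer_instance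

-- ===== CLAIM (what is proved, stated in full; the proofs are below) =====
def Claim_equal_is_head : Prop := ∀ (board : List (List Int)) (bite_row : Int) (bite_column : Int), Dom_is_head board bite_row bite_column → Pre_is_head board bite_row bite_column → Spec_is_head board bite_row bite_column (is_head board bite_row bite_column)

-- ===== LEMMAS AND PROOFS =====

lemma pvM_mono {board : List (List Int)} {R R' : List (Int × Int)}
    (h : R ⊆ R') : pvM board R' ≤ pvM board R := by
  apply Finset.card_le_card
  refine Finset.sdiff_subset_sdiff (Finset.Subset.refl _) ?_
  intro x hx
  simp only [List.mem_toFinset] at *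
  exact h hx

lemma pvM_le (board : List (List Int)) (R : List (Int × Int)) :
    pvM board R ≤ (pvBox board).length :=
  le_trans (Finset.card_le_card (Finset.sdiff_subset)) (pvBox board).toFinset_card_le

lemma pvFoldl_subset {α : Type} (step : List (Int × Int) → α → List (Int × Int))
    (hstep : ∀ R d, R ⊆ step R d) :
    ∀ (ds : List α) (R : List (Int × Int)), R ⊆ ds.foldl step R := by
  intro ds
  induction ds with
  | nil => exact fun R _ h => h
  | cons d ds ih => exact fun R x hx => ih (step R d) (hstep R d hx)

lemma pvDfs_subset (board : List (List Int)) (district : Int) :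
    ∀ (fuel : Nat) (c : Int × Int) (R : List (Int × Int)), R ⊆ pvDfs board district fuel c R := by
  intro fuel
  induction fuel with
  | zero =>
    intro c R
    rw [pvDfs]
    split
    · exact fun _ h => h
    · exact fun _ h => h
  | succ n ih =>
    intro c R
    rw [pvDfs]
    split
    · exact fun _ h => h
    · refine fun x hx => pvFoldl_subset _ ?_ pvDiffs (c :: R) (List.mem_cons_of_mem _ hx)
      intro acc d
      dsimp only
      split
      · exact ih _ acc
      · exact fun _ h => h

lemma pvDfs_fuel (board : List (List Int)) (district : Int) :
    ∀ (k : Nat) (c : Int × Int) (R : List (Int × Int)) (f1 f2 : Nat),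
      pvM board R ≤ k → pvM board R < f1 → pvM board R < f2 →
      pvDfs board district f1 c R = pvDfs board district f2 c R := by
  intro k
  induction k using Nat.strong_induction_on with
  | _ k IH =>
    intro c R f1 f2 hk h1 h2
    obtain ⟨n1, rfl⟩ : ∃ n, f1 = n + 1 := ⟨f1 - 1, by omega⟩
    obtain ⟨n2, rfl⟩ : ∃ n, f2 = n + 1 := ⟨f2 - 1, by omega⟩
    rw [pvDfs, pvDfs]
    by_cases hskip : c ∈ R ∨ pvCellVal board c.1 c.2 ≠ some district
    · rw [if_pos hskip, if_pos hskip]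
    · rw [if_neg hskip, if_neg hskip]
      have h' := not_or.mp hskip
      have hcbox : c ∈ pvBox board := by
        have := pvCellVal_some_box (not_not.mp h'.2)
        simpa using this
      have hcons : pvM board (c :: R) < pvM board R := pvM_lt hcbox h'.1
      have aux : ∀ (ds : List (Int × Int)) (R' : List (Int × Int)),
          pvM board R' ≤ pvM board (c :: R) →
          ds.foldl (fun acc d =>
            if ¬(c.1 + d.1 < 0 ∨ c.2 + d.2 < 0 ∨
                  (board.length : Int) ≤ c.1 + d.1 ∨
                  ((board.headI).length : Int) ≤ c.2 + d.2)
            then pvDfs board district n1 (c.1 + d.1, c.2 + d.2) acc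
            else acc) R' =
          ds.foldl (fun acc d =>
            if ¬(c.1 + d.1 < 0 ∨ c.2 + d.2 < 0 ∨
                  (board.length : Int) ≤ c.1 + d.1 ∨
                  ((board.headI).length : Int) ≤ c.2 + d.2)
            then pvDfs board district n2 (c.1 + d.1, c.2 + d.2) acc
            else acc) R' := by
        intro ds
        induction ds with
        | nil => intro R' _; rfl
        | cons d ds ihds =>
          intro R' hR'
          simp only [List.foldl_cons]
          by_cases hg : ¬(c.1 + d.1 < 0 ∨ c.2 + d.2 < 0 ∨
              (board.length : Int) ≤ c.1 + d.1 ∨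
              ((board.headI).length : Int) ≤ c.2 + d.2)
          · rw [if_pos hg, if_pos hg]
            have hdf : pvDfs board district n1 (c.1 + d.1, c.2 + d.2) R' =
                pvDfs board district n2 (c.1 + d.1, c.2 + d.2) R' := by
              refine IH (pvM board R') (by omega) _ R' n1 n2 le_rfl (by omega) (by omega)
            rw [hdf]
            exact ihds _ (le_trans (pvM_mono (pvDfs_subset board district n2 _ R')) hR')
          · rw [if_neg hg, if_neg hg]
            exact ihds _ hR'
      exact aux pvDiffs (c :: R) le_rfl

lemma pvFoldDfs_fuel (board : List (List Int)) (district : Int) :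
    ∀ (l : List (Int × Int)) (R : List (Int × Int)) (f1 f2 : Nat),
      pvM board R < f1 → pvM board R < f2 →
      l.foldl (fun acc x => pvDfs board district f1 x acc) R =
      l.foldl (fun acc x => pvDfs board district f2 x acc) R := by
  intro l
  induction l with
  | nil => intro R f1 f2 _ _; rfl
  | cons x l ih =>
    intro R f1 f2 h1 h2
    simp only [List.foldl_cons]
    rw [pvDfs_fuel board district (pvM board R) x R f1 f2 le_rfl h1 h2]
    exact ih _ f1 f2
      (lt_of_le_of_lt (pvM_mono (pvDfs_subset board district f2 x R)) h1)
      (lt_of_le_of_lt (pvM_mono (pvDfs_subset board district f2 x R)) h2)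

lemma pvFold_push_gen (board : List (List Int)) (district : Int) (n : Nat) (c : Int × Int) :
    ∀ (ds : List (Int × Int)) (R0 : List (Int × Int)),
      ds.foldl (fun acc d =>
        if ¬(c.1 + d.1 < 0 ∨ c.2 + d.2 < 0 ∨
              (board.length : Int) ≤ c.1 + d.1 ∨
              ((board.headI).length : Int) ≤ c.2 + d.2)
        then pvDfs board district n (c.1 + d.1, c.2 + d.2) acc
        else acc) R0 =
      (ds.filterMap fun d =>
        if 0 ≤ c.1 + d.1 ∧ c.1 + d.1 < (board.length : Int) ∧
            0 ≤ c.2 + d.2 ∧ c.2 + d.2 < ((board.headI).length : Int) then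
          some (c.1 + d.1, c.2 + d.2)
        else none).foldl (fun acc x => pvDfs board district n x acc) R0 := by
  intro ds
  induction ds with
  | nil => intro R0; rfl
  | cons d ds ih =>
    intro R0
    by_cases hg : 0 ≤ c.1 + d.1 ∧ c.1 + d.1 < (board.length : Int) ∧
        0 ≤ c.2 + d.2 ∧ c.2 + d.2 < ((board.headI).length : Int)
    · rw [List.foldl_cons, if_pos (by omega), List.filterMap_cons, if_pos hg]
      rw [List.foldl_cons]
      exact ih _
    · rw [List.foldl_cons, if_neg (by omega), List.filterMap_cons, if_neg hg]
      exact ih _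

lemma pvFold_push (board : List (List Int)) (district : Int) (n : Nat)
    (c : Int × Int) (R0 : List (Int × Int)) :
    pvDiffs.foldl (fun acc d =>
        if ¬(c.1 + d.1 < 0 ∨ c.2 + d.2 < 0 ∨
              (board.length : Int) ≤ c.1 + d.1 ∨
              ((board.headI).length : Int) ≤ c.2 + d.2)
        then pvDfs board district n (c.1 + d.1, c.2 + d.2) acc
        else acc) R0 =
    (pvPush board c).foldl (fun acc x => pvDfs board district n x acc) R0 :=
  pvFold_push_gen board district n c pvDiffs R0

lemma pvPush_box (board : List (List Int)) (c : Int × Int) :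
    ∀ x ∈ pvPush board c, x ∈ pvBox board := by
  intro x hx
  simp only [pvPush, List.mem_filterMap] at hx
  obtain ⟨d, _, hsome⟩ := hx
  split at hsome
  · cases hsome
    exact (pvMem_box board _ _).2 (by assumption)
  · cases hsome

lemma pvFlood_eq (board : List (List Int)) (district : Int) :
    ∀ (st R : List (Int × Int)), (∀ x ∈ st, x ∈ pvBox board) →
      pvFlood board district st R =
      st.foldl (fun acc x => pvDfs board district ((pvBox board).length + 1) x acc) R := by
  intro st R
  fun_induction pvFlood board district st R with
  | case1 R => intro _; rfl
  | case2 R c st h ih =>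
    intro hst
    rw [List.foldl_cons]
    have hc : pvDfs board district ((pvBox board).length + 1) c R = R := by
      rw [pvDfs, if_pos h]
    rw [hc]
    exact ih (fun x hx => hst x (List.mem_cons_of_mem _ hx))
  | case3 R c st h ih =>
    intro hst
    have h' := not_or.mp h
    have hcbox : c ∈ pvBox board := by
      have := pvCellVal_some_box (not_not.mp h'.2)
      simpa using this
    have hcons : pvM board (c :: R) < pvM board R := pvM_lt hcbox h'.1
    have hboxall : ∀ x ∈ pvPush board c ++ st, x ∈ pvBox board := by
      intro x hx
      rcases List.mem_append.mp hx with hx | hx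
      · exact pvPush_box board c x hx
      · exact hst x (List.mem_cons_of_mem _ hx)
    rw [ih hboxall, List.foldl_append, List.foldl_cons]
    have hdfs : pvDfs board district ((pvBox board).length + 1) c R =
        (pvPush board c).foldl
          (fun acc x => pvDfs board district ((pvBox board).length + 1) x acc) (c :: R) := by
      rw [pvDfs, if_neg h]
      rw [pvFold_push board district ((pvBox board).length) c (c :: R)]
      exact pvFoldDfs_fuel board district (pvPush board c) (c :: R) _ _
        (by have := pvM_le board R; omega) (by have := pvM_le board R; omega)
    rw [hdfs]

lemma pvDriver_eq (board : List (List Int)) (district : Int) (br bc : Int) :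
    ∀ (ds : List (Int × Int)) (found : Bool) (R : List (Int × Int)),
      pvDriverA board district br bc ds found R = pvDriverB board district br bc ds found R := by
  intro ds
  induction ds with
  | nil => intro found R; rfl
  | cons d ds ih =>
    intro found R
    simp only [pvDriverA, pvDriverB]
    by_cases hb : 0 ≤ br + d.1 ∧ br + d.1 < (board.length : Int) ∧
        0 ≤ bc + d.2 ∧ bc + d.2 < ((board.headI).length : Int)
    · by_cases hc : pvCellVal board (br + d.1) (bc + d.2) = some district
      · have hA : (¬(br + d.1 < 0 ∨ bc + d.2 < 0 ∨ (board.length : Int) ≤ br + d.1 ∨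
            ((board.headI).length : Int) ≤ bc + d.2)) ∧
            pvCellVal board (br + d.1) (bc + d.2) = some district := ⟨by omega, hc⟩
        have hB : (0 ≤ br + d.1 ∧ br + d.1 < (board.length : Int) ∧
            0 ≤ bc + d.2 ∧ bc + d.2 < ((board.headI).length : Int)) ∧
            pvCellVal board (br + d.1) (bc + d.2) = some district := ⟨hb, hc⟩
        rw [if_pos hA, if_pos hB]
        by_cases hf : found = true ∧ ¬((br + d.1, bc + d.2) ∈ R)
        · rw [if_pos hf, if_pos hf]
        · rw [if_neg hf, if_neg hf]
          have hflood : pvFlood board district [(br + d.1, bc + d.2)] R =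
              pvDfs board district ((pvBox board).length + 1) (br + d.1, bc + d.2) R := by
            rw [pvFlood_eq board district [(br + d.1, bc + d.2)] R
              (by intro x hx; simp only [List.mem_singleton] at hx; subst hx
                  exact (pvMem_box board _ _).2 hb)]
            rw [List.foldl_cons, List.foldl_nil]
          rw [hflood]
          exact ih true _
      · rw [if_neg (fun hh => hc hh.2), if_neg (fun hh => hc hh.2)]
        exact ih found R
    · rw [if_neg (fun hh => hb (by have h1 := hh.1; omega)), if_neg (fun hh => hb hh.1)]
      exact ih found R

-- ===== VERDICT (by name: the statement is the Claim_ definition above) =====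
theorem is_head_spec : Claim_equal_is_head := by
  intro board bite_row bite_column _ _
  unfold Spec_is_head is_head is_head_alt
  rcases PySem.List.pyGet? board bite_row with _ | row
  · rfl
  · dsimp only
    rcases PySem.List.pyGet? row bite_column with _ | district
    · rfl
    · dsimp only
      exact pvDriver_eq board district bite_row bite_column pvDiffs false _
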